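-- pv_equiv track=rewrite | github.com/bb-boy/java | tools/tdms_derive/utils.py | extract_ascii_tokens
-- ===== SOURCE A (Python) =====
-- def extract_ascii_tokens(value: str) -> list[str]:
--     tokens: list[str] = []
--     current: list[str] = []
--     for char in value:
--         if char.isascii() and char.isalnum():
--             current.append(char.upper())
--             continue
--         if current:
--             tokens.append("".join(current))
--             current.clear()
--     if current:
--         tokens.append("".join(current))
--     return tokens
-- ===== SOURCE B (Python) =====
-- def extract_ascii_tokens(value: str) -> list[str]:
--     # Map each char to its uppercase form if ASCII-alphanumeric, else a space,
--     # then let str.split() recover the token boundaries.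
--     return "".join(
--         ch.upper() if ch.isascii() and ch.isalnum() else " " for ch in value
--     ).split()
-- ===== Notes on version B (the rewrite author's own statement) =====
-- stated objective: simpler
-- what changed: Replaced A's explicit token-buffer state machine (append/flush on boundary) with a stateless map-then-split decomposition: each char becomes its uppercase form if ASCII-alphanumeric, else a space, and str.split() recovers the tokens.
import Mathlib
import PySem

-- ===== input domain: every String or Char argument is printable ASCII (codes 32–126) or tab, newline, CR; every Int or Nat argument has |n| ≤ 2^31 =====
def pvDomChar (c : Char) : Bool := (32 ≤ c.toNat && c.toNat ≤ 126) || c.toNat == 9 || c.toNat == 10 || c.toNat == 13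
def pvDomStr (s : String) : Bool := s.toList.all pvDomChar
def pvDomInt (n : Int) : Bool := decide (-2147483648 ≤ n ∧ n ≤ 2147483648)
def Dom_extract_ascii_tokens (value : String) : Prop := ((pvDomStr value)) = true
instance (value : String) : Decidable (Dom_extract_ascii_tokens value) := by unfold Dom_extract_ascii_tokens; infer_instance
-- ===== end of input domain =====

-- B replaces A's explicit flush-on-boundary buffer state machine by a map-then-split
-- decomposition (uppercase ASCII-alnum chars, blank everything else, str.split());
-- objective: simpler.

-- ===== PORT A =====
-- 'char.isascii()' is ported exactly as c.toNat ≤ 127; 'char.isalnum()' on an ASCII char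
-- is PySem.Chars.isalnum; ''.join(current) is String.ofList.
def extractA_go : List Char → List String → List Char → List String
  | [], tokens, current =>
      if current.isEmpty then tokens else tokens ++ [String.ofList current]
  | c :: rest, tokens, current =>
      if (decide (c.toNat ≤ 127)) && PySem.Chars.isalnum c then
        extractA_go rest tokens (current ++ [PySem.Chars.upperChar c])
      else if current.isEmpty then
        extractA_go rest tokens current
      else
        extractA_go rest (tokens ++ [String.ofList current]) []

def extract_ascii_tokens (value : String) : List String :=
  extractA_go value.toList [] []

-- ===== PORT B =====
def extract_ascii_tokens_alt (value : String) : List String :=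
  PySem.Str.split₀ (String.ofList (value.toList.map
    (fun c => if (decide (c.toNat ≤ 127)) && PySem.Chars.isalnum c
              then PySem.Chars.upperChar c else ' ')))

-- ===== PRECONDITION & SPEC =====
def Spec_extract_ascii_tokens (value : String) (out : List String) : Prop := out = extract_ascii_tokens_alt value
instance (value : String) (out : List String) : Decidable (Spec_extract_ascii_tokens value out) := by unfold Spec_extract_ascii_tokens; infer_instance

-- ===== CLAIM (what is proved, stated in full; the proofs are below) =====
def Claim_equal_extract_ascii_tokens : Prop := ∀ (value : String), Dom_extract_ascii_tokens value → Spec_extract_ascii_tokens value (extract_ascii_tokens value)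

-- ===== LEMMAS AND PROOFS =====

-- B's per-char transform.
def pvF (c : Char) : Char :=
  if (decide (c.toNat ≤ 127)) && PySem.Chars.isalnum c then PySem.Chars.upperChar c else ' '

-- An ASCII-alphanumeric char stays non-whitespace after uppercasing.
theorem pv_isspace_upper (c : Char)
    (h : ((decide (c.toNat ≤ 127)) && PySem.Chars.isalnum c) = true) :
    PySem.Chars.isspace (PySem.Chars.upperChar c) = false := by
  simp only [PySem.Chars.isalnum, PySem.Chars.isalpha, PySem.Chars.isdigit,
    PySem.Chars.isupper, PySem.Chars.islower, PySem.Chars.upperChar, Bool.and_eq_true,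
    Bool.or_eq_true, decide_eq_true_eq] at *
  have hval : ∀ n : Nat, n < 55296 → (Char.ofNat n).toNat = n := by
    intro n hn
    have hv : Nat.isValidChar n := Or.inl hn
    simp [Char.ofNat, hv, Char.ofNatAux]
  by_cases hl : ('a' ≤ c ∧ c ≤ 'z')
  · simp only [hl, and_self, if_pos]
    have h1 : 97 ≤ c.toNat := hl.1
    have h2 : c.toNat ≤ 122 := hl.2
    have := hval (c.toNat - 32) (by omega)
    simp [PySem.Chars.isspace, this]
    omega
  · rw [if_neg (by simpa [decide_eq_true_eq] using hl)]
    simp only [PySem.Chars.isspace]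
    rcases h.2 with (⟨h1, h2⟩ | h') | ⟨h1, h2⟩
    · have h1 : 65 ≤ c.toNat := h1
      have h2 : c.toNat ≤ 90 := h2
      simp; omega
    · exact absurd h' hl
    · have h1 : 48 ≤ c.toNat := h1
      have h2 : c.toNat ≤ 57 := h2
      simp; omega

-- split₀.go only reverses its accumulator in front of the rest of the scan.
theorem pv_go_acc (cs : List Char) (cur : List Char) (acc : List (List Char)) :
    PySem.Chars.split₀.go cs cur acc =
      acc.reverse ++ PySem.Chars.split₀.go cs cur [] := by
  induction cs generalizing cur acc with
  | nil =>
      simp only [PySem.Chars.split₀.go]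
      split <;> simp
  | cons c rest ih =>
      simp only [PySem.Chars.split₀.go]
      split
      · split
        · rw [ih [] acc]
        · rw [ih [] (cur.reverse :: acc), ih [] [cur.reverse]]; simp
      · rw [ih (c :: cur) acc]

-- Loop invariant: A's scan with pending buffer `current` equals the tokens emitted
-- so far followed by split₀ of the transformed remainder, seeded with the buffer.
theorem pv_main (cs : List Char) (tokens : List String) (current : List Char) :
    extractA_go cs tokens current =
      tokens ++ (PySem.Chars.split₀.go (cs.map pvF) current.reverse []).map String.ofList := by
  induction cs generalizing tokens current with
  | nil =>
      simp only [extractA_go, List.map_nil, PySem.Chars.split₀.go]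
      by_cases h : current.isEmpty
      · simp [List.isEmpty_iff.mp h]
      · have : current.reverse.isEmpty = false := by
          simp_all [List.isEmpty_iff]
        simp [h, this]
  | cons c rest ih =>
      simp only [extractA_go, List.map_cons]
      by_cases hok : ((decide (c.toNat ≤ 127)) && PySem.Chars.isalnum c) = true
      · have hf : pvF c = PySem.Chars.upperChar c := by simp [pvF, hok]
        have hsp := pv_isspace_upper c hok
        rw [if_pos hok, ih]
        simp only [PySem.Chars.split₀.go, hf, hsp]
        simp
      · have hf : pvF c = ' ' := by simp [pvF, hok]
        have hsp : PySem.Chars.isspace ' ' = true := by decide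
        rw [if_neg hok]
        simp only [PySem.Chars.split₀.go, hf, hsp, if_pos]
        by_cases hcur : current.isEmpty
        · have : current.reverse.isEmpty = true := by simp_all [List.isEmpty_iff]
          simp only [if_pos hcur, this, if_pos]
          exact ih tokens current |>.trans (by simp_all [List.isEmpty_iff])
        · have : current.reverse.isEmpty = false := by simp_all [List.isEmpty_iff]
          simp only [if_neg hcur, this]
          rw [ih, pv_go_acc (rest.map pvF) [] [current.reverse.reverse]]
          simp

-- ===== VERDICT (by name: the statement is the Claim_ definition above) =====
theorem extract_ascii_tokens_spec : Claim_equal_extract_ascii_tokens := by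
  intro value _
  unfold Spec_extract_ascii_tokens extract_ascii_tokens extract_ascii_tokens_alt PySem.Str.split₀
  rw [pv_main, String.toList_ofList]
  rfl
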